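-- pv_equiv track=rewrite | github.com/nicogv10/Python_Projects_Showcase | historical_trends_vf3.py | analyze_past_streaks
-- ===== SOURCE A (Python) =====
-- def analyze_past_streaks(series, streak_value, streak_length):
--     past_streaks = []
--     current_streak = 0
--     for value in series:
--         if value == streak_value:
--             current_streak += 1
--         else:
--             if current_streak >= streak_length:
--                 past_streaks.append(current_streak)
--             current_streak = 0
--     if current_streak >= streak_length:
--         past_streaks.append(current_streak)
--
--     ended_at_length = sum(1 for s in past_streaks if s == streak_length)
--     extended_streaks = [s for s in past_streaks if s > streak_length]
--
--     return len(past_streaks), ended_at_length, extended_streaks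
-- ===== SOURCE B (Python) =====
-- def analyze_past_streaks(series, streak_value, streak_length):
--     # Run-scan: jump from run to run with an index, measuring each maximal
--     # block of streak_value directly; no running counter, no reset branch,
--     # no trailing flush.
--     past_streaks = []
--     i, n = 0, len(series)
--     while i < n:
--         if series[i] == streak_value:
--             j = i
--             while j < n and series[j] == streak_value:
--                 j += 1
--             if j - i >= streak_length:
--                 past_streaks.append(j - i)
--             i = j
--         else:
--             i += 1
--     ended_at_length = sum(1 for s in past_streaks if s == streak_length)
--     extended_streaks = [s for s in past_streaks if s > streak_length]
--     return len(past_streaks), ended_at_length, extended_streaks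
-- ===== Notes on version B (the rewrite author's own statement) =====
-- stated objective: alternative
-- what changed: Replaces A's running-counter state machine (reset branch plus trailing flush) by a run-scan that jumps from one maximal block of streak_value to the next, measuring each block's length directly and recording it if long enough.
-- outside the precondition, e.g. on analyze_past_streaks([2], 1, 0): A returns (2, 2, []), B returns (0, 0, [])
import Mathlib
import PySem

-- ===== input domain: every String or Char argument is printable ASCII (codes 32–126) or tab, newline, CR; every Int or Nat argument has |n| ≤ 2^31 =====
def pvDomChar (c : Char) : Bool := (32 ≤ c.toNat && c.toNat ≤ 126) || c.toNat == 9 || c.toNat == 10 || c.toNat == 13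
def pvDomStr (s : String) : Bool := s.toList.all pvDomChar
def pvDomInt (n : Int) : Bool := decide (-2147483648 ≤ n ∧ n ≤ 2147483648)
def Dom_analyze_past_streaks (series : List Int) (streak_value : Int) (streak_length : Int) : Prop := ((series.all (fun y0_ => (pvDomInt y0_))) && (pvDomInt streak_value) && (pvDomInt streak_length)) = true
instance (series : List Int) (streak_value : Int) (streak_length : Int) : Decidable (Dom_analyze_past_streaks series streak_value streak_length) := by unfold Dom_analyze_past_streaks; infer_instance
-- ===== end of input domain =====

-- B replaces A's running-counter state machine by a run-scan over maximal blocks of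
-- streak_value (alternative decomposition, same O(n) cost).


-- ===== PORT A =====
-- the loop body of A's for-loop: state (past_streaks, current_streak)
def pvStepA (streak_value streak_length : Int) (acc : List Int × Int) (value : Int) : List Int × Int :=
  if value = streak_value then (acc.1, acc.2 + 1)
  else (if streak_length ≤ acc.2 then acc.1 ++ [acc.2] else acc.1, 0)

-- the trailing flush after A's loop
def pvFlushA (streak_length : Int) (st : List Int × Int) : List Int :=
  if streak_length ≤ st.2 then st.1 ++ [st.2] else st.1

def analyze_past_streaks (series : List Int) (streak_value : Int) (streak_length : Int) : Int × Int × List Int :=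
  let past_streaks := pvFlushA streak_length (series.foldl (pvStepA streak_value streak_length) ([], 0))
  ((past_streaks.length : Int),
   ((past_streaks.filter (fun s => s == streak_length)).length : Int),
   past_streaks.filter (fun s => decide (streak_length < s)))

-- ===== PORT B =====
-- B's outer while-loop: walk the list run by run; on a matching element the inner
-- while-scan (takeWhile/dropWhile) measures the whole maximal block and jumps past it.
def pvRunsB (series : List Int) (streak_value : Int) : List Int :=
  match series with
  | [] => []
  | x :: xs =>
    if x = streak_value then
      (1 + ((xs.takeWhile (fun y => y == streak_value)).length : Int)) ::
        pvRunsB (xs.dropWhile (fun y => y == streak_value)) streak_value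
    else
      pvRunsB xs streak_value
termination_by series.length
decreasing_by
  · simpa using Nat.lt_succ_of_le (List.length_dropWhile_le _ _)
  · simp

def analyze_past_streaks_alt (series : List Int) (streak_value : Int) (streak_length : Int) : Int × Int × List Int :=
  let past_streaks := (pvRunsB series streak_value).filter (fun n => decide (streak_length ≤ n))
  ((past_streaks.length : Int),
   ((past_streaks.filter (fun s => s == streak_length)).length : Int),
   past_streaks.filter (fun s => decide (streak_length < s)))

-- ===== PRECONDITION & SPEC =====
-- Pre_ restricts to the natural domain of a positive streak length: for streak_length ≤ 0
-- (a nonsensical request) A appends a zero-length "streak" at every non-matching element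
-- and at the end of the series, an artefact of its reset branch that B does not mirror.
def Pre_analyze_past_streaks (series : List Int) (streak_value : Int) (streak_length : Int) : Prop :=
  1 ≤ streak_length
instance (series : List Int) (streak_value : Int) (streak_length : Int) : Decidable (Pre_analyze_past_streaks series streak_value streak_length) := by unfold Pre_analyze_past_streaks; infer_instance

def pvWitness_analyze_past_streaks : List Int × Int × Int := ([1, 1, 2, 1], 1, 2)

def Spec_analyze_past_streaks (series : List Int) (streak_value : Int) (streak_length : Int) (out : Int × Int × List Int) : Prop := out = analyze_past_streaks_alt series streak_value streak_length
instance (series : List Int) (streak_value : Int) (streak_length : Int) (out : Int × Int × List Int) : Decidable (Spec_analyze_past_streaks series streak_value streak_length out) := by unfold Spec_analyze_past_streaks; infer_instance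

-- ===== CLAIM (what is proved, stated in full; the proofs are below) =====
def Claim_equal_analyze_past_streaks : Prop := ∀ (series : List Int) (streak_value : Int) (streak_length : Int), Dom_analyze_past_streaks series streak_value streak_length → Pre_analyze_past_streaks series streak_value streak_length → Spec_analyze_past_streaks series streak_value streak_length (analyze_past_streaks series streak_value streak_length)

-- ===== LEMMAS AND PROOFS =====

-- A's loop+flush written as a direct recursion on (rest of series, current_streak)
def pvF (v L : Int) : List Int → Int → List Int
  | [], c => if L ≤ c then [c] else []
  | x :: xs, c =>
      if x = v then pvF v L xs (c + 1)
      else if L ≤ c then c :: pvF v L xs 0 else pvF v L xs 0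

theorem pvFoldA_eq_pvF (v L : Int) (s : List Int) (ps : List Int) (c : Int) :
    pvFlushA L (s.foldl (pvStepA v L) (ps, c)) = ps ++ pvF v L s c := by
  induction s generalizing ps c with
  | nil => simp [pvFlushA, pvF]; split_ifs <;> simp
  | cons x xs ih =>
      simp only [List.foldl_cons, pvStepA, pvF]
      split_ifs with h1 h2
      · exact ih ps (c + 1)
      · rw [ih (ps ++ [c]) 0]; simp
      · exact ih ps 0

theorem pvF_eq_runs (v L : Int) (hL : 1 ≤ L) (s : List Int) (c : Int) (hc : 0 ≤ c) :
    pvF v L s c =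
      (if c = 0 then pvRunsB s v
       else (c + ((s.takeWhile (fun y => y == v)).length : Int)) ::
              pvRunsB (s.dropWhile (fun y => y == v)) v).filter
        (fun n => decide (L ≤ n)) := by
  induction s generalizing c with
  | nil =>
      by_cases h : c = 0
      · rw [if_pos h, h]
        simp [pvF, pvRunsB]
        omega
      · rw [if_neg h]
        simp only [pvF, List.takeWhile_nil, List.dropWhile_nil, pvRunsB,
          List.length_nil, Int.natCast_zero, add_zero, List.filter_cons,
          List.filter_nil]
        split_ifs with h2 <;> simp_all <;> omega
  | cons x xs ih =>
      rcases eq_or_ne x v with hx | hx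
      · have h1 : ¬ (c + 1 = 0) := by omega
        have hIH := ih (c + 1) (by omega)
        rw [if_neg h1] at hIH
        have hstep : pvF v L (x :: xs) c = pvF v L xs (c + 1) := by
          simp [pvF, hx]
        rw [hstep, hIH]
        by_cases h : c = 0
        · rw [if_pos h, h]
          rw [show pvRunsB (x :: xs) v
              = (1 + ((xs.takeWhile (fun y => y == v)).length : Int)) ::
                  pvRunsB (xs.dropWhile (fun y => y == v)) v from by
            rw [pvRunsB, if_pos hx]]
          norm_num
        · rw [if_neg h]
          have htw : (x :: xs).takeWhile (fun y => y == v)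
              = x :: xs.takeWhile (fun y => y == v) := by
            simp [hx]
          have hdw : (x :: xs).dropWhile (fun y => y == v)
              = xs.dropWhile (fun y => y == v) := by
            simp [hx]
          rw [htw, hdw]
          simp only [List.length_cons]
          push_cast
          ring_nf
      · have h0 := ih 0 le_rfl
        rw [if_pos rfl] at h0
        have hruns : pvRunsB (x :: xs) v = pvRunsB xs v := by
          rw [pvRunsB, if_neg hx]
        have htw : (x :: xs).takeWhile (fun y => y == v) = [] := by
          simp [hx]
        have hdw : (x :: xs).dropWhile (fun y => y == v) = x :: xs := by
          simp [hx]
        have hstep : pvF v L (x :: xs) c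
            = if L ≤ c then c :: pvF v L xs 0 else pvF v L xs 0 := by
          simp [pvF, hx]
        rw [hstep]
        by_cases h : c = 0
        · rw [if_pos h, h]
          rw [if_neg (by omega : ¬ (L ≤ (0:Int))), h0, hruns]
        · rw [if_neg h, htw, hdw, hruns]
          simp only [List.length_nil, Int.natCast_zero, add_zero, List.filter_cons, h0]
          split_ifs with h2 <;> simp_all <;> omega

-- ===== VERDICT (by name: the statement is the Claim_ definition above) =====
theorem analyze_past_streaks_spec : Claim_equal_analyze_past_streaks := by
  intro series streak_value streak_length _ hpre
  unfold Spec_analyze_past_streaks analyze_past_streaks analyze_past_streaks_alt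
  have h1 := pvFoldA_eq_pvF streak_value streak_length series [] 0
  have h2 := pvF_eq_runs streak_value streak_length hpre series 0 le_rfl
  rw [if_pos rfl] at h2
  rw [h1, List.nil_append, h2]
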